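-- pv_equiv track=rewrite | github.com/Codedotexe/AOC-2020-Python | Day-20/main.py | searchSeamonsterHelper
-- ===== SOURCE A (Python) =====
-- def searchSeamonsterHelper(tileArrayRow, monsterRow):
-- 	maxIndex = len(tileArrayRow) - (len(monsterRow)-1)
--
-- 	for i in range(maxIndex):
-- 		valid = True
--
-- 		for j in range(len(monsterRow)):
-- 			if monsterRow[j] == '#' and tileArrayRow[i+j] == False:
-- 				valid = False
--
-- 		if valid:
-- 			return True
-- 	return False
-- ===== SOURCE B (Python) =====
-- def searchSeamonsterHelper(tileArrayRow, monsterRow):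
-- 	monsterMask = 0
-- 	for j, c in enumerate(monsterRow):
-- 		if c == '#':
-- 			monsterMask |= 1 << j
--
-- 	rowBits = 0
-- 	for k, v in enumerate(tileArrayRow):
-- 		if v != False:
-- 			rowBits |= 1 << k
--
-- 	return any((rowBits >> i) & monsterMask == monsterMask
-- 	           for i in range(len(tileArrayRow) - (len(monsterRow) - 1)))
-- ===== Notes on version B (the rewrite author's own statement) =====
-- stated objective: alternative
-- what changed: Encode the monster's '#' cells and the row's set cells as integer bitmasks built in two independent passes, then decide each shift with a single shift-and-mask subset test, instead of A's nested loop rescanning monster characters with a flag.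
import Mathlib
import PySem

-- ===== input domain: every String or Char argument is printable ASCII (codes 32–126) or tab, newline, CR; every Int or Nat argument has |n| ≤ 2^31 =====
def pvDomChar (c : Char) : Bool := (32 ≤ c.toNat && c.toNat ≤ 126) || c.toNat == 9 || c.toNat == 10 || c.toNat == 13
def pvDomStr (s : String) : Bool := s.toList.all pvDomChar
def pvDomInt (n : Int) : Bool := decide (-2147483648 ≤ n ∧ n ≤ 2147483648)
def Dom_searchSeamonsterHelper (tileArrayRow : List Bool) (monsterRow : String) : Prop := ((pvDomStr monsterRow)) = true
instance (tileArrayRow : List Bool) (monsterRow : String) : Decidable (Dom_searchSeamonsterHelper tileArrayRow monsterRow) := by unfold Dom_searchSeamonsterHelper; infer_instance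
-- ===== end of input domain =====

-- B encodes the monster's '#' cells and the row's set cells as integer bitmasks in two
-- independent passes, then decides each shift with one shift-and-mask subset test.

-- ===== PORT A =====
-- inner loop: 'for j in range(len(monsterRow)): if … : valid = False'
def pvInnerA (tileArrayRow : List Bool) (monsterRow : String) (i : Int) : Bool :=
  (PySem.List.pyRange 0 (PySem.Str.len monsterRow) 1).foldl
    (fun valid j =>
      if PySem.Str.pyGet? monsterRow j = some '#' ∧ PySem.List.pyGet? tileArrayRow (i + j) = some false
      then false else valid) true

-- outer loop with the early 'return True'
def pvLoopA (tileArrayRow : List Bool) (monsterRow : String) : List Int → Bool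
  | [] => false
  | i :: rest =>
      if pvInnerA tileArrayRow monsterRow i then true
      else pvLoopA tileArrayRow monsterRow rest

def searchSeamonsterHelper (tileArrayRow : List Bool) (monsterRow : String) : Bool :=
  let maxIndex : Int := (tileArrayRow.length : Int) - (PySem.Str.len monsterRow - 1)
  pvLoopA tileArrayRow monsterRow (PySem.List.pyRange 0 maxIndex 1)

-- ===== PORT B =====
-- 'monsterMask |= 1 << j' loop over enumerate(monsterRow)
def pvMonsterMask (monsterRow : String) : Nat :=
  monsterRow.toList.zipIdx.foldl
    (fun a p => if p.1 == '#' then a ||| (1 <<< p.2) else a) 0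

-- 'rowBits |= 1 << k' loop over enumerate(tileArrayRow), with Python's 'v != False' test
def pvRowBits (tileArrayRow : List Bool) : Nat :=
  tileArrayRow.zipIdx.foldl
    (fun a p => if p.1 != false then a ||| (1 <<< p.2) else a) 0

def searchSeamonsterHelper_alt (tileArrayRow : List Bool) (monsterRow : String) : Bool :=
  let monsterMask := pvMonsterMask monsterRow
  let rowBits := pvRowBits tileArrayRow
  -- i ranges over nonnegative ints only, so i.toNat is Python's i exactly
  (PySem.List.pyRange 0 ((tileArrayRow.length : Int) - (PySem.Str.len monsterRow - 1)) 1).any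
    (fun i => (rowBits >>> i.toNat) &&& monsterMask == monsterMask)

-- ===== PRECONDITION & SPEC =====
def Spec_searchSeamonsterHelper (tileArrayRow : List Bool) (monsterRow : String) (out : Bool) : Prop := out = searchSeamonsterHelper_alt tileArrayRow monsterRow
instance (tileArrayRow : List Bool) (monsterRow : String) (out : Bool) : Decidable (Spec_searchSeamonsterHelper tileArrayRow monsterRow out) := by unfold Spec_searchSeamonsterHelper; infer_instance

-- ===== CLAIM (what is proved, stated in full; the proofs are below) =====
def Claim_equal_searchSeamonsterHelper : Prop := ∀ (tileArrayRow : List Bool) (monsterRow : String), Dom_searchSeamonsterHelper tileArrayRow monsterRow → Spec_searchSeamonsterHelper tileArrayRow monsterRow (searchSeamonsterHelper tileArrayRow monsterRow)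

-- ===== LEMMAS AND PROOFS =====

-- A's inner flag loop is an 'all' over the same range
theorem pvFoldFlag (P : Int → Prop) [DecidablePred P] (l : List Int) (b : Bool) :
    l.foldl (fun v j => if P j then false else v) b = (b && l.all fun j => !decide (P j)) := by
  induction l generalizing b with
  | nil => simp
  | cons x xs ih =>
      simp only [List.foldl_cons, List.all_cons, ih]
      by_cases h : P x <;> simp [h]

-- A's outer loop is an 'any'
theorem pvLoopA_eq_any (row : List Bool) (m : String) (l : List Int) :
    pvLoopA row m l = l.any (fun i => pvInnerA row m i) := by
  induction l with
  | nil => rfl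
  | cons x xs ih => simp [pvLoopA, ih]

-- bit t of the monster mask fold
theorem pvTestBit_maskFold (l : List (Char × Nat)) (acc t : Nat) :
    (l.foldl (fun a p => if p.1 == '#' then a ||| (1 <<< p.2) else a) acc).testBit t
    = (acc.testBit t || l.any (fun p => p.1 == '#' && p.2 == t)) := by
  induction l generalizing acc with
  | nil => simp
  | cons x xs ih =>
      simp only [List.foldl_cons, List.any_cons, ih]
      by_cases h : x.1 == '#'
      · by_cases ht : x.2 = t <;>
          simp [h, ht, Nat.testBit_or, Nat.one_shiftLeft,
            Bool.or_comm, Bool.or_left_comm]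
      · simp [h]

-- bit s of the row-bits fold
theorem pvTestBit_rowFold (l : List (Bool × Nat)) (acc s : Nat) :
    (l.foldl (fun a p => if p.1 != false then a ||| (1 <<< p.2) else a) acc).testBit s
    = (acc.testBit s || l.any (fun p => p.1 != false && p.2 == s)) := by
  induction l generalizing acc with
  | nil => simp
  | cons x xs ih =>
      simp only [List.foldl_cons, List.any_cons, ih]
      by_cases h : x.1 != false
      · by_cases ht : x.2 = s <;>
          simp [h, ht, Nat.testBit_or, Nat.one_shiftLeft,
            Bool.or_comm, Bool.or_left_comm]
      · simp [h]

theorem pvMonsterMask_testBit (m : String) (t : Nat) :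
    (pvMonsterMask m).testBit t = true ↔ m.toList[t]? = some '#' := by
  rw [pvMonsterMask, pvTestBit_maskFold]
  simp only [Nat.zero_testBit, Bool.false_or, List.any_eq_true]
  constructor
  · rintro ⟨⟨c, k⟩, hmem, hp⟩
    simp only [Bool.and_eq_true, beq_iff_eq] at hp
    obtain ⟨hc, rfl⟩ := hp
    have hz := List.mem_zipIdx hmem
    rw [hz.2.2] at hc
    rw [List.getElem?_eq_getElem (by omega : k < m.toList.length)]
    simpa using congrArg some hc
  · intro h
    exact ⟨('#', t), List.mk_mem_zipIdx_iff_getElem?.2 h, by simp⟩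

theorem pvRowBits_testBit (row : List Bool) (s : Nat) :
    (pvRowBits row).testBit s = true ↔ row[s]? = some true := by
  rw [pvRowBits, pvTestBit_rowFold]
  simp only [Nat.zero_testBit, Bool.false_or, List.any_eq_true]
  constructor
  · rintro ⟨⟨v, k⟩, hmem, hp⟩
    simp only [bne_iff_ne, ne_eq, Bool.not_eq_false, Bool.and_eq_true, beq_iff_eq] at hp
    obtain ⟨hv, rfl⟩ := hp
    have hz := List.mem_zipIdx hmem
    rw [hz.2.2] at hv
    rw [List.getElem?_eq_getElem (by omega : k < row.length)]
    simpa using congrArg some hv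
  · intro h
    exact ⟨(true, s), List.mk_mem_zipIdx_iff_getElem?.2 h, by simp⟩

-- subset test via and-with-mask
theorem pvLandEq (a b : Nat) :
    (a &&& b = b) ↔ ∀ t, b.testBit t = true → a.testBit t = true := by
  constructor
  · intro h t hb
    have := congrArg (fun x => x.testBit t) h
    simp only [Nat.testBit_and, hb, Bool.and_true] at this
    exact this
  · intro h
    apply Nat.eq_of_testBit_eq
    intro t
    rw [Nat.testBit_and]
    cases hb : b.testBit t
    · simp
    · simp [h t hb]

-- the common characterisation: every '#' of the monster sits on a true cell at shift i
theorem pvInnerA_iff (row : List Bool) (m : String) (i : Int)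
    (h0 : 0 ≤ i) (h1 : i + (m.toList.length : Int) ≤ (row.length : Int)) :
    pvInnerA row m i = true ↔
      ∀ t : Nat, m.toList[t]? = some '#' → row[i.toNat + t]? = some true := by
  rw [pvInnerA, pvFoldFlag, Bool.true_and, List.all_eq_true]
  constructor
  · intro H t hm
    obtain ⟨ht, _⟩ := List.getElem?_eq_some_iff.1 hm
    have hj : (t : Int) ∈ PySem.List.pyRange 0 (PySem.Str.len m) 1 := by
      rw [PySem.List.mem_pyRange_one]
      simp only [PySem.Str.len_eq]
      constructor
      · positivity
      · exact_mod_cast ht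
    have hnand := H _ hj
    simp only [Bool.not_eq_eq_eq_not, Bool.not_true, decide_eq_false_iff_not, not_and] at hnand
    have hm' : PySem.Str.pyGet? m (t : Int) = some '#' := by
      simp only [PySem.Str.pyGet?_natCast]; exact hm
    have hne := hnand hm'
    have hcast : i + (t : Int) = ((i.toNat + t : Nat) : Int) := by omega
    rw [hcast, PySem.List.pyGet?_natCast] at hne
    have hlt : i.toNat + t < row.length := by omega
    rw [List.getElem?_eq_getElem hlt] at hne ⊢
    simp only [Option.some.injEq] at hne ⊢
    cases hb : row[i.toNat + t] with
    | false => exact absurd hb hne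
    | true => rfl
  · intro H j hj
    rw [PySem.List.mem_pyRange_one] at hj
    obtain ⟨hj0, hj1⟩ := hj
    simp only [PySem.Str.len_eq] at hj1
    simp only [Bool.not_eq_eq_eq_not, Bool.not_true, decide_eq_false_iff_not, not_and]
    intro hhash
    lift j to ℕ using hj0 with k
    have hk : k < m.toList.length := by exact_mod_cast hj1
    have hm : m.toList[k]? = some '#' := by
      rw [PySem.Str.pyGet?_natCast] at hhash; exact hhash
    have hT := H k hm
    have hcast : i + (k : Int) = ((i.toNat + k : Nat) : Int) := by omega
    rw [hcast, PySem.List.pyGet?_natCast, hT]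
    simp

-- B's per-shift subset test matches the same characterisation
theorem pvMaskTest_iff (row : List Bool) (m : String) (i : Int) :
    ((pvRowBits row >>> i.toNat) &&& pvMonsterMask m == pvMonsterMask m) = true ↔
      ∀ t : Nat, m.toList[t]? = some '#' → row[i.toNat + t]? = some true := by
  rw [beq_iff_eq, pvLandEq]
  constructor
  · intro H t hm
    have := H t ((pvMonsterMask_testBit m t).2 hm)
    rw [Nat.testBit_shiftRight] at this
    exact (pvRowBits_testBit row (i.toNat + t)).1 this
  · intro H t hb
    rw [Nat.testBit_shiftRight]
    exact (pvRowBits_testBit row (i.toNat + t)).2 (H t ((pvMonsterMask_testBit m t).1 hb))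

-- ===== VERDICT (by name: the statement is the Claim_ definition above) =====
theorem searchSeamonsterHelper_spec : Claim_equal_searchSeamonsterHelper := by
  intro row m _
  unfold Spec_searchSeamonsterHelper
  simp only [searchSeamonsterHelper, searchSeamonsterHelper_alt]
  rw [pvLoopA_eq_any, Bool.eq_iff_iff, List.any_eq_true, List.any_eq_true]
  constructor <;> intro ⟨i, hi, hv⟩ <;> refine ⟨i, hi, ?_⟩ <;>
    (have hi' := (PySem.List.mem_pyRange_one).1 hi;
     simp only [PySem.Str.len_eq] at hi')
  · exact (pvMaskTest_iff row m i).2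
      ((pvInnerA_iff row m i hi'.1 (by omega)).1 hv)
  · exact (pvInnerA_iff row m i hi'.1 (by omega)).2
      ((pvMaskTest_iff row m i).1 hv)
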